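-- pv_equiv track=rewrite | github.com/Principle-of-Web-Search-2019/test-HunYuanfeng | 24.py | MyPermutations
-- ===== SOURCE A (Python) =====
-- def MyPermutations(num_list):
--     seen = []
--     result = []
--     L = range(len(num_list))
--     for i in L:
--           for j in L:
--                 for k in L:
--                     for w in L:
--                         if len(set((i,j,k,w))) == 4:
--                             result.append(list((i,j,k,w)))
--     for each in result:
--         temp = [num_list[each[0]],num_list[each[1]],num_list[each[2]],num_list[each[3]]]
--         if temp not in seen:
--             seen.append(temp)
--
--     return seen
-- ===== SOURCE B (Python) =====
-- def MyPermutations(num_list):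
--     # Recursive backtracking over index prefixes instead of four nested index
--     # loops plus a separate dedup pass; duplicates are pruned as the prefix
--     # grows and value-lists are deduplicated on the fly with a list `not in`.
--     seen = []
--     n = len(num_list)
--
--     def backtrack(prefix):
--         if len(prefix) == 4:
--             temp = [num_list[i] for i in prefix]
--             if temp not in seen:
--                 seen.append(temp)
--             return
--         for i in range(n):
--             if i not in prefix:
--                 backtrack(prefix + [i])
--
--     backtrack([])
--     return seen
-- ===== Notes on version B (the rewrite author's own statement) =====
-- stated objective: alternative
-- what changed: Replaces A's four nested index loops that build a full quadruple list followed by a separate dedup pass with a recursive backtracking search over index prefixes that prunes already-used indices early and deduplicates value-lists on the fly with a list membership test.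
import Mathlib
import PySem

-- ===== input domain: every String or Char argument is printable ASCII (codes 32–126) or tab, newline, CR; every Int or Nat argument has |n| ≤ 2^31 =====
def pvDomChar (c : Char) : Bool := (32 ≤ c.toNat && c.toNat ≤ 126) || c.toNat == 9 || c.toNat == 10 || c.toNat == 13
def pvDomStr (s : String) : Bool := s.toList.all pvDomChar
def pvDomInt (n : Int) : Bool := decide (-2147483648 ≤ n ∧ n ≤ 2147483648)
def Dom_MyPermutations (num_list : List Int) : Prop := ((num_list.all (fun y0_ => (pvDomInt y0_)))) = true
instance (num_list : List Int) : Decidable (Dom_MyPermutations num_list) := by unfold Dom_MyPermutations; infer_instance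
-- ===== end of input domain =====

-- B replaces A's four nested index loops + separate dedup pass by a recursive
-- backtracking search over index prefixes that prunes duplicate indices early
-- and deduplicates value-lists on the fly (objective: alternative decomposition).

-- ===== PORT A =====
def MyPermutations (num_list : List Int) : List (List Int) :=
  let L := PySem.List.pyRange 0 (num_list.length : Int) 1
  let result : List (Int × Int × Int × Int) :=
    L.foldl (fun r i =>
      L.foldl (fun r j =>
        L.foldl (fun r k =>
          L.foldl (fun r w =>
            if (PySem.Set.ofList [i, j, k, w]).length = 4 then r ++ [(i, j, k, w)] else r)
            r)
          r)
        r)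
      []
  result.foldl (fun seen each =>
    -- num_list[each[m]] : indices come from range(len) so always in range; pyGetD is exact here
    let temp := [PySem.List.pyGetD num_list each.1 0, PySem.List.pyGetD num_list each.2.1 0,
                 PySem.List.pyGetD num_list each.2.2.1 0, PySem.List.pyGetD num_list each.2.2.2 0]
    if temp ∈ seen then seen else seen ++ [temp]) []

-- ===== PORT B =====
-- recursion on the number of indices still to choose (= 4 - len(prefix) in Source B)
def pvBacktrack (num_list : List Int) (pre : List Int) (d : Nat) (seen : List (List Int)) :
    List (List Int) :=
  match d with
  | 0 =>
      let temp := pre.map (fun i => PySem.List.pyGetD num_list i 0)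
      if temp ∈ seen then seen else seen ++ [temp]
  | d + 1 =>
      (PySem.List.pyRange 0 (num_list.length : Int) 1).foldl
        (fun s i => if i ∈ pre then s else pvBacktrack num_list (pre ++ [i]) d s) seen

def MyPermutations_alt (num_list : List Int) : List (List Int) :=
  pvBacktrack num_list [] 4 []

-- ===== PRECONDITION & SPEC =====
def Spec_MyPermutations (num_list : List Int) (out : List (List Int)) : Prop := out = MyPermutations_alt num_list
instance (num_list : List Int) (out : List (List Int)) : Decidable (Spec_MyPermutations num_list out) := by unfold Spec_MyPermutations; infer_instance

-- ===== CLAIM (what is proved, stated in full; the proofs are below) =====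
def Claim_equal_MyPermutations : Prop := ∀ (num_list : List Int), Dom_MyPermutations num_list → Spec_MyPermutations num_list (MyPermutations num_list)

-- ===== LEMMAS AND PROOFS =====

-- dedup-append step shared by both sides
def pvDadd (s : List (List Int)) (t : List Int) : List (List Int) :=
  if t ∈ s then s else s ++ [t]

-- the tree of index prefixes B explores, as a list of completed prefixes
def pvExt (L : List Int) (pre : List Int) : Nat → List (List Int)
  | 0 => [pre]
  | d + 1 => L.flatMap (fun i => if i ∈ pre then [] else pvExt L (pre ++ [i]) d)

lemma pv_ite_append {α : Type} (c : Prop) [Decidable c] (r : List α) (x : α) :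
    (if c then r ++ [x] else r) = r ++ (if c then [x] else []) := by
  split <;> simp

lemma pv_foldl_eq_foldl_flatMap {α β γ : Type} (g : β → γ → β) (h : β → α → β) (G : α → List γ)
    (H : ∀ s i, h s i = (G i).foldl g s) :
    ∀ (L : List α) (s : β), L.foldl h s = (L.flatMap G).foldl g s := by
  intro L
  induction L with
  | nil => simp
  | cons a L ih => intro s; simp [List.foldl_append, H, ih]

lemma pv_setlen4_iff (i j k w : Int) :
    ((PySem.Set.ofList [i, j, k, w]).length = 4) ↔
      (j ≠ i ∧ k ≠ i ∧ k ≠ j ∧ w ≠ i ∧ w ≠ j ∧ w ≠ k) := by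
  simp [PySem.Set.ofList, PySem.Set.add, PySem.Set.contains, List.foldl]
  split_ifs <;> simp_all <;> omega

lemma pvBacktrack_eq (xs : List Int) :
    ∀ (d : Nat) (pre : List Int) (s : List (List Int)),
      pvBacktrack xs pre d s =
        ((pvExt (PySem.List.pyRange 0 (xs.length : Int) 1) pre d).map
          (fun p => p.map (fun i => PySem.List.pyGetD xs i 0))).foldl pvDadd s := by
  intro d
  induction d with
  | zero => intro pre s; simp [pvBacktrack, pvExt, pvDadd]
  | succ d ih =>
    intro pre s
    rw [pvBacktrack, pvExt, List.map_flatMap]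
    apply pv_foldl_eq_foldl_flatMap
    intro s i
    by_cases hi : i ∈ pre
    · simp [hi]
    · simp [hi, ih]

lemma pvKey (L : List Int) :
    ((L.flatMap fun i => L.flatMap fun j => L.flatMap fun k => L.flatMap fun w =>
        if (PySem.Set.ofList [i, j, k, w]).length = 4 then [(i, j, k, w)] else []).map
      (fun q => [q.1, q.2.1, q.2.2.1, q.2.2.2])) = pvExt L [] 4 := by
  simp only [List.map_flatMap]
  show _ = L.flatMap (fun i => if i ∈ ([]:List Int) then [] else pvExt L ([] ++ [i]) 3)
  congr 1; funext i
  simp only [List.not_mem_nil, if_false, List.nil_append, pvExt]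
  congr 1; funext j
  by_cases hj : j = i
  · simp [pv_setlen4_iff, hj]
  · simp only [List.mem_singleton, hj, if_false, List.cons_append, List.nil_append]
    congr 1; funext k
    by_cases hk : k = i ∨ k = j
    · rcases hk with hk | hk <;> simp [pv_setlen4_iff, hk, hj]
    · push Not at hk
      simp only [List.mem_cons, hk.1, hk.2]
      congr 1; funext w
      by_cases hw : w = i ∨ w = j ∨ w = k
      · rcases hw with hw | hw | hw <;> simp_all [pv_setlen4_iff]
      · push Not at hw
        simp_all [pv_setlen4_iff]

lemma pvA_eq (xs : List Int) :
    MyPermutations xs =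
      ((pvExt (PySem.List.pyRange 0 (xs.length : Int) 1) [] 4).map
        (fun p => p.map (fun i => PySem.List.pyGetD xs i 0))).foldl pvDadd [] := by
  rw [MyPermutations]
  simp only [pv_ite_append, PySem.List.foldl_append_eq_flatMap, List.nil_append]
  rw [← pvKey, List.map_map]
  rw [List.foldl_map]
  rfl

-- ===== VERDICT (by name: the statement is the Claim_ definition above) =====
theorem MyPermutations_spec : Claim_equal_MyPermutations := by
  intro xs _
  show MyPermutations xs = MyPermutations_alt xs
  rw [pvA_eq, MyPermutations_alt, pvBacktrack_eq]
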